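-- pv_equiv track=rewrite | github.com/Jardynq/pm4py-dcr | pm4py/algo/discovery/dfg/utils/dfg_utils.py | sum_end_activities_count
-- ===== SOURCE A (Python) =====
-- def get_outgoing_edges(dfg):
--     """
--     Gets outgoing edges of the provided DFG graph
--     """
--     outgoing = {}
--     for el in dfg:
--         if type(el[0]) is str:
--             if not el[0] in outgoing:
--                 outgoing[el[0]] = {}
--             outgoing[el[0]][el[1]] = dfg[el]
--         else:
--             if not el[0][0] in outgoing:
--                 outgoing[el[0][0]] = {}
--             outgoing[el[0][0]][el[0][1]] = el[1]
--     return outgoing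
--
-- def get_ingoing_edges(dfg):
--     """
--     Get ingoing edges of the provided DFG graph
--     """
--     ingoing = {}
--     for el in dfg:
--         if type(el[0]) is str:
--             if not el[1] in ingoing:
--                 ingoing[el[1]] = {}
--             ingoing[el[1]][el[0]] = dfg[el]
--         else:
--             if not el[0][1] in ingoing:
--                 ingoing[el[0][1]] = {}
--             ingoing[el[0][1]][el[0][0]] = el[1]
--     return ingoing
--
-- def sum_end_activities_count(dfg):
--     """
--     Gets the sum of end attributes count inside a DFG
--
--     Parameters
--     -------------
--     dfg
--         Directly-Follows graph
--
--     Returns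
--     -------------
--         Sum of start attributes count
--     """
--     ingoing = get_ingoing_edges(dfg)
--     outgoing = get_outgoing_edges(dfg)
--
--     sum_values = 0
--
--     for act in ingoing:
--         if not act in outgoing:
--             for act2 in ingoing[act]:
--                 sum_values += ingoing[act][act2]
--
--     return sum_values
-- ===== SOURCE B (Python) =====
-- def sum_end_activities_count(dfg):
--     """
--     Gets the sum of end attributes count inside a DFG
--
--     One pass collecting a flat edge map (last write wins, like the original's
--     nested dicts) and the set of source activities, then one filtered sum over
--     the edges whose target never occurs as a source.
--     """
--     sources = set()
--     edges = {}
--     for el in dfg: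
--         if type(el[0]) is str:
--             src, tgt, cnt = el[0], el[1], dfg[el]
--         else:
--             (src, tgt), cnt = el
--         sources.add(src)
--         edges[(src, tgt)] = cnt
--     return sum(cnt for (src, tgt), cnt in edges.items() if tgt not in sources)
-- ===== Notes on version B (the rewrite author's own statement) =====
-- stated objective: simpler
-- what changed: Replaces the two nested adjacency dicts (ingoing/outgoing) and the nested two-level summation with a single pass that keeps a flat (src,tgt)->count edge map (last write wins, like the original) plus a set of source activities, followed by one filtered sum over the edges whose target is never a source.
import Mathlib
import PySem

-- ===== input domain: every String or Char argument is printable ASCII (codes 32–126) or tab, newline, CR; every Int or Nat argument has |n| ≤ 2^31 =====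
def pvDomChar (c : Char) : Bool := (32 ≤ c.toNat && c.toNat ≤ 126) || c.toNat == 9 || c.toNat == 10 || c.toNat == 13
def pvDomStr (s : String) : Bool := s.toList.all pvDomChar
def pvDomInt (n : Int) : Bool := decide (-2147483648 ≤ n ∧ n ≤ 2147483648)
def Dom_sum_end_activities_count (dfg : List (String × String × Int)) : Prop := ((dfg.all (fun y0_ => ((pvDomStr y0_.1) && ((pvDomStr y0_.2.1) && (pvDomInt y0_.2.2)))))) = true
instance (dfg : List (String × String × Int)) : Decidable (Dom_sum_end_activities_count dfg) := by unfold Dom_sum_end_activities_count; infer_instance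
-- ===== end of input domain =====

-- B replaces the two nested adjacency dicts and the nested summation by one flat
-- edge map plus a source set and a single filtered sum (objective: simpler).


-- ===== PORT A =====
-- The dfg is a dict {(src, tgt): count}, so only A's `type(el[0]) is str` branch runs
-- (el = (src, tgt), count = dfg[el]).  Python's `if k not in d: d[k] = {}` followed by
-- `d[k][k2] = v` is exactly PySem.Dict.modify k empty (·.insert k2 v).
def pvIngoing (dfg : List (String × String × Int)) : PySem.Dict String (PySem.Dict String Int) :=
  dfg.foldl (fun ingoing el =>
    ingoing.modify el.2.1 PySem.Dict.empty (fun inner => inner.insert el.1 el.2.2)) PySem.Dict.empty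

def pvOutgoing (dfg : List (String × String × Int)) : PySem.Dict String (PySem.Dict String Int) :=
  dfg.foldl (fun outgoing el =>
    outgoing.modify el.1 PySem.Dict.empty (fun inner => inner.insert el.2.1 el.2.2)) PySem.Dict.empty

def sum_end_activities_count (dfg : List (String × String × Int)) : Int :=
  let ingoing := pvIngoing dfg
  let outgoing := pvOutgoing dfg
  ingoing.items.foldl (fun sum_values p =>
    if outgoing.contains p.1 then sum_values
    else p.2.items.foldl (fun s q => s + q.2) sum_values) 0

-- ===== PORT B =====
-- One pass: source set + flat edge dict; then one filtered sum over edges.items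
-- (`sources` is only used for membership, so Python's set-iteration order is never read).
def sum_end_activities_count_alt (dfg : List (String × String × Int)) : Int :=
  let se := dfg.foldl (fun (se : PySem.Set String × PySem.Dict (String × String) Int) el =>
    (PySem.Set.add se.1 el.1, se.2.insert (el.1, el.2.1) el.2.2)) (PySem.Set.empty, PySem.Dict.empty)
  se.2.items.foldl (fun acc q => if PySem.Set.contains se.1 q.1.2 then acc else acc + q.2) 0

-- ===== PRECONDITION & SPEC =====
def Spec_sum_end_activities_count (dfg : List (String × String × Int)) (out : Int) : Prop := out = sum_end_activities_count_alt dfg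
instance (dfg : List (String × String × Int)) (out : Int) : Decidable (Spec_sum_end_activities_count dfg out) := by unfold Spec_sum_end_activities_count; infer_instance

-- ===== CLAIM (what is proved, stated in full; the proofs are below) =====
def Claim_equal_sum_end_activities_count : Prop := ∀ (dfg : List (String × String × Int)), Dom_sum_end_activities_count dfg → Spec_sum_end_activities_count dfg (sum_end_activities_count dfg)

-- ===== LEMMAS AND PROOFS =====

-- sum of the counts stored in an inner dict
def pvInnerSum (inner : PySem.Dict String Int) : Int := (inner.items.map (·.2)).sum
-- A's filtered nested sum, as a sum over items
def pvSumA (P : String → Bool) (d : PySem.Dict String (PySem.Dict String Int)) : Int :=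
  (d.items.map (fun p => if P p.1 then 0 else pvInnerSum p.2)).sum
-- B's filtered flat sum, as a sum over items
def pvSumB (P : String → Bool) (e : PySem.Dict (String × String) Int) : Int :=
  (e.items.map (fun q => if P q.1.2 then 0 else q.2)).sum

theorem pvSumA_foldl (P : String → Bool) (l : List (String × PySem.Dict String Int)) (a : Int) :
    l.foldl (fun sum_values p => if P p.1 then sum_values
      else p.2.items.foldl (fun s q => s + q.2) sum_values) a
      = a + (l.map (fun p => if P p.1 then 0 else pvInnerSum p.2)).sum := by
  induction l generalizing a with
  | nil => simp
  | cons p rest ih =>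
    simp only [List.foldl_cons, List.map_cons, List.sum_cons, ih]
    by_cases h : P p.1 = true
    · simp [h]
    · simp only [h, if_neg, Bool.not_eq_true] at *
      rw [PySem.List.foldl_add]
      simp [pvInnerSum]
      ring

theorem pvSumB_foldl (P : String → Bool) (l : List ((String × String) × Int)) (a : Int) :
    l.foldl (fun acc q => if P q.1.2 then acc else acc + q.2) a
      = a + (l.map (fun q => if P q.1.2 then 0 else q.2)).sum := by
  induction l generalizing a with
  | nil => simp
  | cons q rest ih =>
    simp only [List.foldl_cons, List.map_cons, List.sum_cons, ih]
    by_cases h : P q.1.2 = true <;> simp [h] <;> ring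

-- replacing the (unique, by Nodup keys) entry at key k changes a sum over the items accordingly
theorem pvSum_map_replace {κ ν : Type} [BEq κ] [LawfulBEq κ] (l : List (κ × ν)) (k : κ) (v : ν)
    (g : κ × ν → Int) (hnd : (l.map Prod.fst).Nodup) (w : ν) (hw : (k, w) ∈ l) :
    ((l.map (fun p => if p.1 == k then (k, v) else p)).map g).sum
      = (l.map g).sum - g (k, w) + g (k, v) := by
  induction l with
  | nil => simp at hw
  | cons p rest ih =>
    simp only [List.map_cons, List.nodup_cons, List.mem_map] at hnd
    rcases List.mem_cons.1 hw with hhead | htail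
    · subst hhead
      simp only [List.map_cons, List.sum_cons, beq_self_eq_true, if_pos]
      have hrest : rest.map (fun p => if p.1 == k then (k, v) else p) = rest.map id := by
        apply List.map_congr_left
        intro q hq
        have : q.1 ≠ k := by
          intro hc; exact hnd.1 ⟨q, hq, hc⟩
        simp [this]
      rw [hrest, List.map_id]; ring
    · have hpk : p.1 ≠ k := by
        intro hc
        exact hnd.1 ⟨(k, w), htail, by simp [hc]⟩
      simp only [List.map_cons, List.sum_cons, hpk, beq_iff_eq, if_neg, not_false_iff]
      rw [ih hnd.2 htail]; ring

theorem pvInnerSum_insert (inner : PySem.Dict String Int) (s : String) (c : Int)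
    (hnd : inner.keys.Nodup) :
    pvInnerSum (inner.insert s c) = pvInnerSum inner + c - inner.getD s 0 := by
  by_cases h : inner.contains s = true
  · obtain ⟨w, hw⟩ : ∃ w, inner.get? s = some w := by
      rcases ho : inner.get? s with _ | w
      · rw [PySem.Dict.get?_eq_none_iff_contains] at ho; simp [ho] at h
      · exact ⟨w, rfl⟩
    have hmem : (s, w) ∈ inner.items := PySem.Dict.mem_items_of_get?_eq_some inner hw
    unfold pvInnerSum
    rw [PySem.Dict.items_insert_of_contains inner c h,
        pvSum_map_replace inner.items s c _ hnd w hmem]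
    simp [PySem.Dict.getD_eq_get?_getD, hw]
    ring
  · have h' : inner.contains s = false := by simpa using h
    unfold pvInnerSum
    rw [PySem.Dict.items_insert_of_not_contains inner c h']
    have : inner.get? s = none := (PySem.Dict.get?_eq_none_iff_contains inner s).2 h'
    simp [PySem.Dict.getD_eq_get?_getD, this]

theorem pvSumA_insert (P : String → Bool) (d : PySem.Dict String (PySem.Dict String Int))
    (t : String) (inner' : PySem.Dict String Int) (hnd : d.keys.Nodup) :
    pvSumA P (d.insert t inner')
      = pvSumA P d + (if P t then 0 else pvInnerSum inner' - pvInnerSum (d.getD t PySem.Dict.empty)) := by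
  by_cases h : d.contains t = true
  · obtain ⟨w, hw⟩ : ∃ w, d.get? t = some w := by
      rcases ho : d.get? t with _ | w
      · rw [PySem.Dict.get?_eq_none_iff_contains] at ho; simp [ho] at h
      · exact ⟨w, rfl⟩
    have hmem : (t, w) ∈ d.items := PySem.Dict.mem_items_of_get?_eq_some d hw
    unfold pvSumA
    rw [PySem.Dict.items_insert_of_contains d inner' h,
        pvSum_map_replace d.items t inner' _ hnd w hmem]
    simp only [PySem.Dict.getD_eq_get?_getD, hw, Option.getD_some]
    by_cases hp : P t = true <;> simp [hp] <;> ring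
  · have h' : d.contains t = false := by simpa using h
    unfold pvSumA
    rw [PySem.Dict.items_insert_of_not_contains d inner' h']
    have hn : d.get? t = none := (PySem.Dict.get?_eq_none_iff_contains d t).2 h'
    simp only [PySem.Dict.getD_eq_get?_getD, hn, Option.getD_none]
    by_cases hp : P t = true <;>
      simp [hp, pvInnerSum, PySem.Dict.empty] <;> ring

theorem pvSumB_insert (P : String → Bool) (e : PySem.Dict (String × String) Int)
    (k : String × String) (v : Int) (hnd : e.keys.Nodup) :
    pvSumB P (e.insert k v)
      = pvSumB P e + (if P k.2 then 0 else v - e.getD k 0) := by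
  by_cases h : e.contains k = true
  · obtain ⟨w, hw⟩ : ∃ w, e.get? k = some w := by
      rcases ho : e.get? k with _ | w
      · rw [PySem.Dict.get?_eq_none_iff_contains] at ho; simp [ho] at h
      · exact ⟨w, rfl⟩
    have hmem : (k, w) ∈ e.items := PySem.Dict.mem_items_of_get?_eq_some e hw
    unfold pvSumB
    rw [PySem.Dict.items_insert_of_contains e v h,
        pvSum_map_replace e.items k v _ hnd w hmem]
    simp only [PySem.Dict.getD_eq_get?_getD, hw, Option.getD_some]
    by_cases hp : P k.2 = true <;> simp [hp] <;> ring
  · have h' : e.contains k = false := by simpa using h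
    unfold pvSumB
    rw [PySem.Dict.items_insert_of_not_contains e v h']
    have hn : e.get? k = none := (PySem.Dict.get?_eq_none_iff_contains e k).2 h'
    simp only [PySem.Dict.getD_eq_get?_getD, hn, Option.getD_none]
    by_cases hp : P k.2 = true <;> simp [hp] <;> ring

-- main invariant induction: A's nested-dict filtered sum moves in lockstep with B's flat-dict filtered sum
theorem pvMain (P : String → Bool) (l : List (String × String × Int))
    (ing : PySem.Dict String (PySem.Dict String Int)) (edg : PySem.Dict (String × String) Int)
    (hndI : ing.keys.Nodup) (hndE : edg.keys.Nodup)
    (hinner : ∀ t inner, ing.get? t = some inner → inner.keys.Nodup)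
    (hinv : ∀ s t, edg.get? (s, t) = (ing.get? t).bind (fun inner => inner.get? s)) :
    pvSumA P (l.foldl (fun d el => d.modify el.2.1 PySem.Dict.empty (fun inner => inner.insert el.1 el.2.2)) ing)
      + pvSumB P edg
    = pvSumB P (l.foldl (fun e el => e.insert (el.1, el.2.1) el.2.2) edg)
      + pvSumA P ing := by
  induction l generalizing ing edg with
  | nil => simp [List.foldl_nil]; ring
  | cons el rest ih =>
    obtain ⟨s, t, c⟩ := el
    simp only [List.foldl_cons]
    -- the two one-step updates
    set inner0 := ing.getD t PySem.Dict.empty with hinner0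
    have hstepI : (ing.modify t PySem.Dict.empty (fun inner => inner.insert s c))
        = ing.insert t (inner0.insert s c) := rfl
    rw [hstepI]
    have hinner0_nodup : inner0.keys.Nodup := by
      rw [hinner0, PySem.Dict.getD_eq_get?_getD]
      rcases ho : ing.get? t with _ | inner
      · simpa [PySem.Dict.empty, PySem.Dict.keys] using List.nodup_nil
      · exact hinner t inner ho
    -- invariants for the updated dicts
    have hndI' : (ing.insert t (inner0.insert s c)).keys.Nodup :=
      PySem.Dict.nodup_keys_insert ing t _ hndI
    have hndE' : (edg.insert (s, t) c).keys.Nodup :=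
      PySem.Dict.nodup_keys_insert edg (s, t) c hndE
    have hinner' : ∀ t' inner, (ing.insert t (inner0.insert s c)).get? t' = some inner → inner.keys.Nodup := by
      intro t' inner hget
      rw [PySem.Dict.get?_insert] at hget
      by_cases ht : t' = t
      · simp only [ht, if_pos] at hget
        cases hget
        exact PySem.Dict.nodup_keys_insert inner0 s c hinner0_nodup
      · simp only [ht, if_neg, not_false_iff] at hget
        exact hinner t' inner hget
    have hinv' : ∀ s' t', (edg.insert (s, t) c).get? (s', t')
        = ((ing.insert t (inner0.insert s c)).get? t').bind (fun inner => inner.get? s') := by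
      intro s' t'
      rw [PySem.Dict.get?_insert, PySem.Dict.get?_insert]
      by_cases ht : t' = t
      · subst ht
        simp only [if_pos rfl, Option.bind_some]
        by_cases hs : s' = s
        · subst hs
          simp [PySem.Dict.get?_insert_self]
        · rw [if_neg (show ¬((s', t') = (s, t')) by simp [hs])]
          simp only [if_true, Option.bind_some]
          rw [PySem.Dict.get?_insert_of_ne inner0 c hs]
          rw [hinv s' t', hinner0, PySem.Dict.getD_eq_get?_getD]
          rcases ho : ing.get? t' with _ | inner <;>
            simp [PySem.Dict.get?_empty, PySem.Dict.empty, PySem.Dict.get?]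
      · rw [if_neg (by simp [ht]), if_neg ht, hinv s' t']
    -- one-step sum deltas agree
    have hdA : pvSumA P (ing.insert t (inner0.insert s c))
        = pvSumA P ing + (if P t then 0 else c - inner0.getD s 0) := by
      rw [pvSumA_insert P ing t _ hndI, ← hinner0,
          pvInnerSum_insert inner0 s c hinner0_nodup]
      by_cases hp : P t = true <;> simp [hp] <;> ring
    have hdB : pvSumB P (edg.insert (s, t) c)
        = pvSumB P edg + (if P t then 0 else c - inner0.getD s 0) := by
      rw [pvSumB_insert P edg (s, t) c hndE]
      have : edg.getD (s, t) 0 = inner0.getD s 0 := by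
        rw [PySem.Dict.getD_eq_get?_getD, hinv s t, hinner0,
            PySem.Dict.getD_eq_get?_getD, PySem.Dict.getD_eq_get?_getD]
        rcases ho : ing.get? t with _ | inner <;>
          simp [PySem.Dict.empty, PySem.Dict.get?]
      rw [this]
    have := ih (ing.insert t (inner0.insert s c)) (edg.insert (s, t) c) hndI' hndE' hinner' hinv'
    rw [hdA, hdB] at this
    linarith [this]
  
-- the outgoing dict's key set IS B's source set
theorem pvKeys_outgoing (dfg : List (String × String × Int)) :
    (pvOutgoing dfg).keys = dfg.foldl (fun s p => PySem.Set.add s p.1) PySem.Set.empty := by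
  unfold pvOutgoing
  rw [PySem.Dict.keys_foldl_modify_key dfg Prod.fst PySem.Dict.empty
      (fun _ x inner => inner.insert x.2.1 x.2.2) PySem.Dict.empty]
  have h1 : (PySem.Dict.empty : PySem.Dict String (PySem.Dict String Int)).keys = [] := rfl
  rw [h1]
  show PySem.Set.update [] (dfg.map Prod.fst) = _
  rw [show (PySem.Set.update [] (dfg.map Prod.fst) : PySem.Set String)
      = (dfg.map Prod.fst).foldl PySem.Set.add [] from rfl, List.foldl_map]
  rfl

-- B's paired fold is the pair of the two independent folds
theorem pvFoldl_pair (l : List (String × String × Int)) (a : PySem.Set String)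
    (b : PySem.Dict (String × String) Int) :
    l.foldl (fun (se : PySem.Set String × PySem.Dict (String × String) Int) el =>
        (PySem.Set.add se.1 el.1, se.2.insert (el.1, el.2.1) el.2.2)) (a, b)
      = (l.foldl (fun s el => PySem.Set.add s el.1) a,
         l.foldl (fun e el => e.insert (el.1, el.2.1) el.2.2) b) := by
  induction l generalizing a b with
  | nil => rfl
  | cons p rest ih => simp only [List.foldl_cons]; exact ih _ _

-- ===== VERDICT (by name: the statement is the Claim_ definition above) =====
theorem sum_end_activities_count_spec : Claim_equal_sum_end_activities_count := by
  intro dfg _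
  unfold Spec_sum_end_activities_count sum_end_activities_count sum_end_activities_count_alt
  rw [pvFoldl_pair]
  set sources := dfg.foldl (fun s el => PySem.Set.add s el.1) PySem.Set.empty with hsrc
  have hP : ∀ t, (pvOutgoing dfg).contains t = PySem.Set.contains sources t := by
    intro t
    rw [PySem.Dict.contains_eq_decide_mem_keys, pvKeys_outgoing, hsrc]
    simp [PySem.Set.contains, List.contains_iff_mem]
  have hA := pvSumA_foldl (fun t => PySem.Set.contains sources t)
    (pvIngoing dfg).items 0
  have hB := pvSumB_foldl (fun t => PySem.Set.contains sources t)
    (dfg.foldl (fun e el => e.insert (el.1, el.2.1) el.2.2) PySem.Dict.empty).items 0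
  have hmain := pvMain (fun t => PySem.Set.contains sources t) dfg
    PySem.Dict.empty PySem.Dict.empty
    (by simp [PySem.Dict.keys, PySem.Dict.empty])
    (by simp [PySem.Dict.keys, PySem.Dict.empty])
    (by intro t inner h; simp [PySem.Dict.get?_empty] at h)
    (by intro s t; simp [PySem.Dict.get?_empty])
  have hemptyA : pvSumA (fun t => PySem.Set.contains sources t) PySem.Dict.empty = 0 := rfl
  have hemptyB : pvSumB (fun t => PySem.Set.contains sources t) PySem.Dict.empty = 0 := rfl
  rw [hemptyA, hemptyB] at hmain
  simp only [hP]
  rw [hA, hB]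
  have hkey : pvSumA (fun t => PySem.Set.contains sources t) (pvIngoing dfg)
      = pvSumB (fun t => PySem.Set.contains sources t)
          (dfg.foldl (fun e el => e.insert (el.1, el.2.1) el.2.2) PySem.Dict.empty) := by
    unfold pvIngoing
    linarith [hmain]
  unfold pvSumA pvSumB at hkey
  linarith [hkey]
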